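-- pv_equiv track=rewrite | github.com/slopezr2/VU | LEKS-LOTOS-EUROS/lekf/v3.0/run_smoother_v2/LE_communication/LE_communication.py | look_files
-- ===== SOURCE A (Python) =====
-- def look_files(words,files):
-- 	"""
-- 	Select the files that contains the word from a list of files
-- 	"""
-- 	if type(words)==str:
-- 		words_aux = words.split()
-- 	elif type(words)==list:
-- 		words_aux = words
--
-- 	files_with_word = files.copy()
-- 	for word in words_aux:
-- 		filter = [word in file for file in files_with_word]
-- 		files_with_word  =  [i for (i, v) in zip(files_with_word, filter) if v]
--
-- 	return files_with_word
-- ===== SOURCE B (Python) =====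
-- def look_files(words, files):
--     """
--     Select the files that contains the word from a list of files
--     """
--     if type(words) == str:
--         words_aux = words.split()
--     elif type(words) == list:
--         words_aux = words
--     return [f for f in files if all(w in f for w in words_aux)]
-- ===== Notes on version B (the rewrite author's own statement) =====
-- stated objective: simpler
-- what changed: Replaces the word-by-word narrowing with its intermediate filtered lists by a single pass over the original files testing all words per file with all().
import Mathlib
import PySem

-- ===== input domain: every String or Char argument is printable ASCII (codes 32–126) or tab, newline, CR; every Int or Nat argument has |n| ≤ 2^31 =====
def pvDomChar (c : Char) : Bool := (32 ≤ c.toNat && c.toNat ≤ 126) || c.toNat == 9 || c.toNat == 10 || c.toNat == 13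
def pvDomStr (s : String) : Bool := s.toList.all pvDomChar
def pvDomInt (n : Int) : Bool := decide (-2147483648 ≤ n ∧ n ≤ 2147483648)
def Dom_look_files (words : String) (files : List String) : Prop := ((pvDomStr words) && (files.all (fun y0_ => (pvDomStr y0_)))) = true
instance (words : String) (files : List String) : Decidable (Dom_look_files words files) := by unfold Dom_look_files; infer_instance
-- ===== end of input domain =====

-- B replaces A's word-by-word narrowing (building an intermediate filtered list per word)
-- by a single filter over the original files testing all words per file; objective: simpler.

-- ===== PORT A =====
def look_files (words : String) (files : List String) : List String :=
  let words_aux := PySem.Str.split₀ words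
  let files_with_word := files
  words_aux.foldl (fun fw word =>
    let filt := fw.map (fun file => PySem.Str.isIn word file)
    ((fw.zip filt).filter (fun p => p.2)).map (fun p => p.1)) files_with_word

-- ===== PORT B =====
def look_files_alt (words : String) (files : List String) : List String :=
  files.filter (fun f => (PySem.Str.split₀ words).all (fun w => PySem.Str.isIn w f))

-- ===== PRECONDITION & SPEC =====
def Spec_look_files (words : String) (files : List String) (out : List String) : Prop := out = look_files_alt words files
instance (words : String) (files : List String) (out : List String) : Decidable (Spec_look_files words files out) := by unfold Spec_look_files; infer_instance

-- ===== CLAIM (what is proved, stated in full; the proofs are below) =====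
def Claim_equal_look_files : Prop := ∀ (words : String) (files : List String), Dom_look_files words files → Spec_look_files words files (look_files words files)

-- ===== LEMMAS AND PROOFS =====

-- A's zip-with-booleans step is a plain filter
theorem pv_zip_filter (fw : List String) (word : String) :
    ((fw.zip (fw.map (fun file => PySem.Str.isIn word file))).filter (fun p => p.2)).map
      (fun p => p.1) = fw.filter (fun f => PySem.Str.isIn word f) := by
  induction fw with
  | nil => rfl
  | cons a t ih =>
    simp only [List.map, List.zip_cons_cons, List.filter_cons]
    simp only [PySem.Str.isIn_eq] at ih ⊢
    by_cases h : PySem.Chars.isIn word.toList a.toList = true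
    · simp [h, ih]
    · simp [h, ih]

-- folding successive filters over the word list = one filter with all
theorem pv_foldl_filter (ws : List String) (fs : List String) :
    ws.foldl (fun fw word => fw.filter (fun f => PySem.Str.isIn word f)) fs
      = fs.filter (fun f => ws.all (fun w => PySem.Str.isIn w f)) := by
  induction ws generalizing fs with
  | nil => simp
  | cons w t ih =>
    simp only [List.foldl_cons, ih, List.filter_filter, List.all_cons]
    congr 1
    funext f
    by_cases h1 : PySem.Str.isIn w f = true <;> simp [PySem.Str.isIn_eq] at h1 <;> simp [h1, Bool.and_comm]

-- ===== VERDICT (by name: the statement is the Claim_ definition above) =====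
theorem look_files_spec : Claim_equal_look_files := by
  intro words files _
  show look_files words files = look_files_alt words files
  unfold look_files look_files_alt
  simp only [pv_zip_filter]
  exact pv_foldl_filter _ _
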